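-- pv_equiv track=rewrite | github.com/jabalpureishan/LeetCode-and-GeeksForGeeks | Reversing the equation - GFG/reversing-the-equation.py | reverseEqn
-- ===== SOURCE A (Python) =====
-- def reverseEqn(s):
--     numbers = []
--     other = []
--     current = ""
--     s += "$"
--     for i in s:
--         if i.isdigit():
--             current += i
--         else:
--             numbers.append(current)
--             other.append(i)
--             current = ""
--     output = ""
--     other.pop()
--     for i in range(-1,-(len(numbers)),-1):
--         output += numbers[i] + other[i]
--     output += numbers[0]
--     return output
-- ===== SOURCE B (Python) =====
-- def reverseEqn(s):
--     # Reverse the whole string, which reverses token order AND the digits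
--     # inside each number, then restore each maximal digit run's order.
--     out = []
--     run = []
--     for c in reversed(s):
--         if c.isdigit():
--             run.append(c)
--         else:
--             out.append(''.join(reversed(run)))
--             out.append(c)
--             run = []
--     out.append(''.join(reversed(run)))
--     return ''.join(out)
-- ===== Notes on version B (the rewrite author's own statement) =====
-- stated objective: simpler
-- what changed: Instead of parsing into parallel numbers/other lists with a '$' sentinel and rebuilding via negative indexing, B makes one pass over the reversed string, re-reversing each maximal digit run in place.
import Mathlib
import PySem

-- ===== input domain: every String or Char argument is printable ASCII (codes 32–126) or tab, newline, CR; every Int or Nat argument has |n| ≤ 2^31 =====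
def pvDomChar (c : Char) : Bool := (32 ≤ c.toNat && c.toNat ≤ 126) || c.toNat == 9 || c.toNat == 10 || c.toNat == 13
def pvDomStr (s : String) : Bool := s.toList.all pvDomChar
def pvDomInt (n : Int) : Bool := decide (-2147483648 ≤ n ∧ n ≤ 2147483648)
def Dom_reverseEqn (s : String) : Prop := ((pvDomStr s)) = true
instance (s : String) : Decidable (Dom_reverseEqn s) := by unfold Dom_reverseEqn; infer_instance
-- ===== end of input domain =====

-- B replaces A's two-list parse + sentinel + negative-index rebuild by one pass over the
-- reversed string that re-reverses every maximal digit run (objective: simpler).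

-- ===== PORT A =====
-- state = (numbers, other, current); strings are modelled as List Char (exact on the ASCII
-- domain, where Python's str.isdigit on one char is Char.isDigit)
def stepA (st : List (List Char) × List Char × List Char) (c : Char) :
    List (List Char) × List Char × List Char :=
  if c.isDigit then (st.1, st.2.1, st.2.2 ++ [c])
  else (st.1 ++ [st.2.2], st.2.1 ++ [c], [])

def reverseEqn (s : String) : String :=
  -- s += "$"; for i in s: …
  let st := (s.toList ++ ['$']).foldl stepA ([], [], [])
  let numbers := st.1
  let other := (st.2.1).dropLast            -- other.pop(): '$' is always last
  -- for i in range(-1, -(len(numbers)), -1): output += numbers[i] + other[i]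
  -- indices are always in range in Python, so pyGetD is exact here
  let output := (PySem.List.pyRange (-1) (-(numbers.length : Int)) (-1)).foldl
    (fun acc i => acc ++ PySem.List.pyGetD numbers i [] ++ [PySem.List.pyGetD other i ' ']) []
  -- output += numbers[0]: numbers is never empty ('$' forces one append)
  String.ofList (output ++ numbers.headD [])

-- ===== PORT B =====
-- run = the pending digit run, in reversed-string order; emitted as run.reverse
def fixRuns : List Char → List Char → List Char
  | run, [] => run.reverse
  | run, c :: rest =>
      if c.isDigit then fixRuns (run ++ [c]) rest
      else run.reverse ++ c :: fixRuns [] rest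

def reverseEqn_alt (s : String) : String :=
  String.ofList (fixRuns [] s.toList.reverse)

-- ===== PRECONDITION & SPEC =====
def Spec_reverseEqn (s : String) (out : String) : Prop := out = reverseEqn_alt s
instance (s : String) (out : String) : Decidable (Spec_reverseEqn s out) := by
  unfold Spec_reverseEqn; infer_instance

-- ===== CLAIM (what is proved, stated in full; the proofs are below) =====
def Claim_equal_reverseEqn : Prop := ∀ (s : String), Dom_reverseEqn s → Spec_reverseEqn s (reverseEqn s)

-- ===== LEMMAS AND PROOFS =====

-- the completed numbers of l (one per non-digit char), given pending run cur
def pnums : List Char → List Char → List (List Char)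
  | _, [] => []
  | cur, c :: t => if c.isDigit then pnums (cur ++ [c]) t else cur :: pnums [] t

-- the pending run after processing l
def pcur : List Char → List Char → List Char
  | cur, [] => cur
  | cur, c :: t => if c.isDigit then pcur (cur ++ [c]) t else pcur [] t

-- token-level reversal: the common value of both ports
def tokRev : List (List Char) → List Char → List Char
  | [n], [] => n
  | n :: ns, o :: os => tokRev ns os ++ o :: n
  | _, _ => []

lemma pnums_append (l1 l2 : List Char) : ∀ cur,
    pnums cur (l1 ++ l2) = pnums cur l1 ++ pnums (pcur cur l1) l2 := by
  induction l1 with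
  | nil => intro cur; simp [pnums, pcur]
  | cons c t ih =>
      intro cur
      by_cases h : c.isDigit <;> simp [pnums, pcur, h, ih]

lemma pcur_append (l1 l2 : List Char) : ∀ cur,
    pcur cur (l1 ++ l2) = pcur (pcur cur l1) l2 := by
  induction l1 with
  | nil => intro cur; simp [pcur]
  | cons c t ih =>
      intro cur
      by_cases h : c.isDigit <;> simp [pcur, h, ih]

lemma pnums_length (l : List Char) : ∀ cur,
    (pnums cur l).length = (l.filter (fun c => !c.isDigit)).length := by
  induction l with
  | nil => intro cur; simp [pnums]
  | cons c t ih =>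
      intro cur
      by_cases h : c.isDigit <;> simp [pnums, h, ih]

lemma foldA (l : List Char) : ∀ ns os cur,
    l.foldl stepA (ns, os, cur) =
      (ns ++ pnums cur l, os ++ l.filter (fun c => !c.isDigit), pcur cur l) := by
  induction l with
  | nil => intro ns os cur; simp [pnums, pcur]
  | cons c t ih =>
      intro ns os cur
      by_cases h : c.isDigit <;>
        simp [stepA, h, pnums, pcur, ih]

lemma tokRev_snoc (os : List Char) : ∀ (ns : List (List Char)) (n : List Char) (o : Char),
    ns.length = os.length + 1 →
    tokRev (ns ++ [n]) (os ++ [o]) = n ++ o :: tokRev ns os := by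
  induction os with
  | nil =>
      intro ns n o h
      match ns, h with
      | [n0], _ => simp [tokRev]
  | cons o0 os' ih =>
      intro ns n o h
      match ns, h with
      | n0 :: ns', h =>
        have h' : ns'.length = os'.length + 1 := by simpa using h
        calc tokRev ((n0 :: ns') ++ [n]) ((o0 :: os') ++ [o])
            = tokRev (ns' ++ [n]) (os' ++ [o]) ++ o0 :: n0 := by simp [tokRev]
          _ = (n ++ o :: tokRev ns' os') ++ o0 :: n0 := by rw [ih _ _ _ h']
          _ = n ++ o :: tokRev (n0 :: ns') (o0 :: os') := by simp [tokRev]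

-- B's scan computes tokRev of the parse of the un-reversed string
lemma fixRuns_eq (rl : List Char) : ∀ run,
    fixRuns run rl =
      tokRev (pnums [] rl.reverse ++ [pcur [] rl.reverse ++ run.reverse])
             (rl.reverse.filter (fun c => !c.isDigit)) := by
  induction rl with
  | nil => intro run; simp [fixRuns, pnums, pcur, tokRev]
  | cons c t ih =>
      intro run
      by_cases h : c.isDigit
      · have e1 : pnums [] (t.reverse ++ [c]) = pnums [] t.reverse := by
          simp [pnums_append, pnums, h]
        have e2 : pcur [] (t.reverse ++ [c]) = pcur [] t.reverse ++ [c] := by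
          simp [pcur_append, pcur, h]
        simp [fixRuns, h, ih, e1, e2]
      · have e1 : pnums [] (t.reverse ++ [c]) = pnums [] t.reverse ++ [pcur [] t.reverse] := by
          simp [pnums_append, pnums, h]
        have e2 : pcur [] (t.reverse ++ [c]) = [] := by
          simp [pcur_append, pcur, h]
        have hlen : (pnums [] t.reverse ++ [pcur [] t.reverse]).length
            = (t.reverse.filter (fun c => !c.isDigit)).length + 1 := by
          simp [pnums_length]
        rw [show fixRuns run (c :: t) = run.reverse ++ c :: fixRuns [] t by simp [fixRuns, h]]
        rw [ih]
        simp only [List.reverse_cons, e1, e2, List.filter_append, List.filter_cons, h,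
          List.filter_nil, List.reverse_nil, List.append_nil, List.nil_append, Bool.not_false,
          if_true]
        rw [tokRev_snoc _ _ _ _ hlen]

-- A's index loop, rendered with Nat indices
def gOut (k : Nat) (ns : List (List Char)) (os : List Char) : List Char :=
  ((List.range k).map (fun j => ns.getD (k - j) [] ++ [os.getD (k - 1 - j) ' '])).flatten
    ++ ns.headD []

lemma gOut_eq_tokRev (os : List Char) : ∀ ns : List (List Char),
    ns.length = os.length + 1 → gOut os.length ns os = tokRev ns os := by
  induction os with
  | nil =>
      intro ns h
      match ns, h with
      | [n], _ => simp [gOut, tokRev]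
  | cons o0 os' ih =>
      intro ns h
      match ns, h with
      | n0 :: ns', h =>
        have h' : ns'.length = os'.length + 1 := by simpa using h
        have hrec := ih ns' h'
        unfold gOut at hrec ⊢
        rw [List.length_cons, List.range_succ, List.map_append, List.flatten_append]
        have hmap : (List.range os'.length).map
              (fun j => (n0 :: ns').getD (os'.length + 1 - j) [] ++ [(o0 :: os').getD (os'.length + 1 - 1 - j) ' '])
            = (List.range os'.length).map
              (fun j => ns'.getD (os'.length - j) [] ++ [os'.getD (os'.length - 1 - j) ' ']) := by
          apply List.map_congr_left
          intro j hj
          rw [List.mem_range] at hj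
          have e1 : os'.length + 1 - j = (os'.length - j) + 1 := by omega
          have e2 : os'.length + 1 - 1 - j = (os'.length - 1 - j) + 1 := by omega
          rw [e1, e2]
          simp
        rw [hmap]
        have hlast : (n0 :: ns').getD (os'.length + 1 - os'.length) []
            = ns'.headD [] := by
          have : os'.length + 1 - os'.length = 1 := by omega
          rw [this]
          cases ns' <;> simp
        have hlast2 : (o0 :: os').getD (os'.length + 1 - 1 - os'.length) ' ' = o0 := by
          have : os'.length + 1 - 1 - os'.length = 0 := by omega
          rw [this]; simp
        rw [List.map_singleton, List.flatten_singleton, hlast, hlast2]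
        have : tokRev (n0 :: ns') (o0 :: os') = tokRev ns' os' ++ o0 :: n0 := by
          cases ns' with
          | nil => exact absurd h' (by simp)
          | cons a b => simp [tokRev]
        rw [this, ← hrec]
        simp [List.getD]

-- the pyRange fold of A equals gOut
lemma foldRange_eq_gOut (ns : List (List Char)) (os : List Char)
    (h : ns.length = os.length + 1) :
    (PySem.List.pyRange (-1) (-(ns.length : Int)) (-1)).foldl
        (fun acc i => acc ++ PySem.List.pyGetD ns i [] ++ [PySem.List.pyGetD os i ' ']) []
      ++ ns.headD []
    = gOut os.length ns os := by
  have hk : (-1 - -(ns.length : Int)).toNat = os.length := by omega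
  rw [PySem.List.pyRange_neg_one, hk]
  unfold gOut
  rw [List.foldl_map]
  have : ∀ (init : List Char) (js : List Nat), (∀ j ∈ js, j < os.length) →
      js.foldl (fun (acc : List Char) (j : Nat) => acc ++ PySem.List.pyGetD ns (-1 - (j : Int)) []
                  ++ [PySem.List.pyGetD os (-1 - (j : Int)) ' ']) init
      = init ++ (js.map (fun j => ns.getD (os.length - j) [] ++ [os.getD (os.length - 1 - j) ' '])).flatten := by
    intro init js
    induction js generalizing init with
    | nil => intro _; simp
    | cons j t ihj =>
        intro hmem
        have hj : j < os.length := hmem j (List.mem_cons_self ..)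
        have ens : PySem.List.pyGetD ns (-1 - (j : Int)) [] = ns.getD (os.length - j) [] := by
          have e : (-1 - (j : Int)) = -(((j + 1 : Nat)) : Int) := by push_cast; ring
          rw [e, PySem.List.pyGetD_neg_natCast _ _ _ (by omega) (by omega),
            List.getD_eq_getElem _ _ (by omega)]
          simp only [show ns.length - (j + 1) = os.length - j from by omega]
        have eos : PySem.List.pyGetD os (-1 - (j : Int)) ' ' = os.getD (os.length - 1 - j) ' ' := by
          have e : (-1 - (j : Int)) = -(((j + 1 : Nat)) : Int) := by push_cast; ring
          rw [e, PySem.List.pyGetD_neg_natCast _ _ _ (by omega) (by omega),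
            List.getD_eq_getElem _ _ (by omega)]
          simp only [show os.length - (j + 1) = os.length - 1 - j from by omega]
        simp only [List.foldl_cons, List.map_cons, List.flatten_cons]
        rw [ihj _ (fun x hx => hmem x (List.mem_cons_of_mem _ hx)), ens, eos]
        simp
  rw [this [] _ (by intro j hj; rw [List.mem_range] at hj; omega)]
  simp

-- ===== VERDICT (by name: the statement is the Claim_ definition above) =====
theorem reverseEqn_spec : Claim_equal_reverseEqn := by
  intro s _
  unfold Spec_reverseEqn reverseEqn reverseEqn_alt
  set l := s.toList with hl
  dsimp only
  rw [List.foldl_append, foldA, foldA]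
  have hd : '$'.isDigit = false := by decide
  simp only [pnums, hd, List.filter_cons, List.filter_nil, Bool.not_false, if_true,
    if_false, List.nil_append, Bool.false_eq_true]
  rw [List.dropLast_concat]
  have hlen : (pnums [] l ++ [pcur [] l]).length
      = (l.filter (fun c => !c.isDigit)).length + 1 := by simp [pnums_length]
  rw [foldRange_eq_gOut _ _ hlen, gOut_eq_tokRev _ _ hlen, fixRuns_eq]
  simp
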